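-- pv_equiv track=rewrite | github.com/ZCLLOVE/-Java- | NLP.py | match_last_uppercase
-- ===== SOURCE A (Python) =====
-- def match_last_uppercase(input_str):
--     # 找到字符串中最后一个大写字母的索引
--     last_uppercase_index = None
--     for i in range(len(input_str) - 1, -1, -1):
--         if input_str[i].isupper():
--             last_uppercase_index = i
--             break
--
--     # 如果找到了最后一个大写字母
--     if last_uppercase_index is not None:
--         # 提取最后一个大写字母开始的三个字符，并转换为小写形式
--         result = input_str[last_uppercase_index:last_uppercase_index + 3].lower()
--         return result
--     else:
--         return None
-- ===== SOURCE B (Python) =====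
-- def match_last_uppercase(input_str):
--     # Build all uppercase positions in one forward pass, then pick the last.
--     idxs = [i for i, c in enumerate(input_str) if c.isupper()]
--     if not idxs:
--         return None
--     i = idxs[-1]
--     return input_str[i:i + 3].lower()
-- ===== Notes on version B (the rewrite author's own statement) =====
-- stated objective: idiomatic
-- what changed: Replaces the backward index scan with early break by a forward comprehension collecting all uppercase positions, then selecting the last one.
import Mathlib
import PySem

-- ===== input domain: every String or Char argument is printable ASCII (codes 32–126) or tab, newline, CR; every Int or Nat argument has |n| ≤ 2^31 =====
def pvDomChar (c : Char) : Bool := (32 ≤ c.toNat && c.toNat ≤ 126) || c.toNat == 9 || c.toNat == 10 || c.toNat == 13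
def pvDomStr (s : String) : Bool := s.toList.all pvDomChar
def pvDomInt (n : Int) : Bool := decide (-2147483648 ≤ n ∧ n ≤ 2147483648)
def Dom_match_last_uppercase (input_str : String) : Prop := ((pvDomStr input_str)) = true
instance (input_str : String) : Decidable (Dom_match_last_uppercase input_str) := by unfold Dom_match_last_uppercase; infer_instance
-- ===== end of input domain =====

-- B replaces A's backward scan with early break by a forward pass collecting all
-- uppercase positions and selecting the last one (idiomatic decomposition; same cost).

-- ===== PORT A =====
-- the backward for-loop with break: first i in the countdown range with s[i] uppercase
-- (indices drawn from range(len-1,-1,-1) are always in range, so pyGetD's default is never used)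
def findUpA (s : List Char) : List Int → Option Int
  | [] => none
  | i :: rest =>
      if PySem.Chars.isupper (PySem.List.pyGetD s i ' ') then some i else findUpA s rest

def match_last_uppercase (input_str : String) : Option String :=
  match findUpA input_str.toList
      (PySem.List.pyRange ((input_str.toList.length : Int) - 1) (-1) (-1)) with
  | some i => some (PySem.Str.lower (PySem.Str.slice input_str (some i) (some (i + 3))))
  | none => none

-- ===== PORT B =====
def match_last_uppercase_alt (input_str : String) : Option String :=
  let idxs := ((PySem.List.enumerate input_str.toList 0).filter
      (fun p => PySem.Chars.isupper p.2)).map (·.1)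
  if idxs.isEmpty then none
  else
    match PySem.List.pyGet? idxs (-1) with
    | some i => some (PySem.Str.lower (PySem.Str.slice input_str (some i) (some (i + 3))))
    | none => none

-- ===== PRECONDITION & SPEC =====
def Spec_match_last_uppercase (input_str : String) (out : Option String) : Prop := out = match_last_uppercase_alt input_str
instance (input_str : String) (out : Option String) : Decidable (Spec_match_last_uppercase input_str out) := by unfold Spec_match_last_uppercase; infer_instance

-- ===== CLAIM (what is proved, stated in full; the proofs are below) =====
def Claim_equal_match_last_uppercase : Prop := ∀ (input_str : String), Dom_match_last_uppercase input_str → Spec_match_last_uppercase input_str (match_last_uppercase input_str)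

-- ===== LEMMAS AND PROOFS =====

-- findUpA only looks at the characters at the indices of the range
theorem findUpA_congr (s t : List Char) (r : List Int)
    (h : ∀ i ∈ r, PySem.List.pyGetD s i ' ' = PySem.List.pyGetD t i ' ') :
    findUpA s r = findUpA t r := by
  induction r with
  | nil => rfl
  | cons i rest ih =>
      simp only [findUpA, h i (List.mem_cons_self ..)]
      rw [ih (fun j hj => h j (List.mem_cons_of_mem _ hj))]

-- A's backward first hit equals the last element of B's forward index list
theorem findUpA_eq_getLast (xs : List Char) :
    findUpA xs (PySem.List.pyRange ((xs.length : Int) - 1) (-1) (-1))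
      = (((PySem.List.enumerate xs 0).filter
          (fun p => PySem.Chars.isupper p.2)).map (·.1)).getLast? := by
  induction xs using List.reverseRecOn with
  | nil => simp [PySem.List.enumerate, findUpA]
  | append_singleton xs c ih =>
      have hlen : ((xs ++ [c]).length : Int) - 1 = (xs.length : Int) := by
        simp only [List.length_append, List.length_cons, List.length_nil]
        push_cast; ring
      rw [hlen, PySem.List.pyRange_neg_one_cons (by omega), findUpA]
      have hget : PySem.List.pyGetD (xs ++ [c]) (xs.length : Int) ' ' = c := by
        rw [PySem.List.pyGetD_of_nonneg _ _ (by omega)]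
        simp [List.getD]
      rw [hget]
      rw [PySem.List.enumerate_append]
      simp only [List.filter_append, List.map_append]
      by_cases hc : PySem.Chars.isupper c
      · simp [hc, PySem.List.enumerate]
      · simp only [hc, if_neg, Bool.false_eq_true, not_false_iff]
        have hcongr : findUpA (xs ++ [c]) (PySem.List.pyRange ((xs.length : Int) - 1) (-1) (-1))
            = findUpA xs (PySem.List.pyRange ((xs.length : Int) - 1) (-1) (-1)) := by
          apply findUpA_congr
          intro i hi
          rw [PySem.List.mem_pyRange_neg_one] at hi
          rw [PySem.List.pyGetD_of_nonneg _ _ (by omega), PySem.List.pyGetD_of_nonneg _ _ (by omega)]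
          have h1 : i.toNat < xs.length := by omega
          simp [List.getD, List.getElem?_append_left h1]
        rw [hcongr, ih]
        simp [hc, PySem.List.enumerate]

theorem pyGet?_neg_one {α : Type} (xs : List α) (h : xs ≠ []) :
    PySem.List.pyGet? xs (-1) = xs.getLast? := by
  have hlen : 0 < xs.length := List.length_pos_iff.mpr h
  simp only [PySem.List.pyGet?, PySem.List.pyIdx?]
  rw [if_neg (by omega), if_pos (by omega)]
  simp [List.getLast?_eq_getElem?]

-- ===== VERDICT (by name: the statement is the Claim_ definition above) =====
theorem match_last_uppercase_spec : Claim_equal_match_last_uppercase := by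
  intro s _
  unfold Spec_match_last_uppercase match_last_uppercase match_last_uppercase_alt
  rw [findUpA_eq_getLast]
  set idxs := ((PySem.List.enumerate s.toList 0).filter
      (fun p => PySem.Chars.isupper p.2)).map (·.1) with hidxs
  by_cases hemp : idxs = []
  · simp [hemp]
  · rw [if_neg (by simpa [List.isEmpty_iff] using hemp), pyGet?_neg_one idxs hemp]
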